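-- pv_equiv track=rewrite | github.com/pcsouzafv/idiomabr2026 | backend/app/routes/games.py | _pick_focus_word
-- ===== SOURCE A (Python) =====
-- def _pick_focus_word(tokens: list[str]) -> str:
--     # Prefer an alphabetic token to show as "palavra foco".
--     stopwords = {
--         "a", "an", "the", "to", "of", "and", "or", "but", "for", "with",
--         "at", "in", "on", "from", "by", "is", "are", "was", "were", "be",
--         "been", "being", "do", "does", "did", "have", "has", "had", "i",
--         "you", "he", "she", "it", "we", "they", "me", "him", "her", "them",
--         "my", "your", "his", "her", "its", "our", "their", "this", "that",
--         "these", "those", "there", "here", "as", "so", "if", "then", "when",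
--     }
--     for t in tokens:
--         clean = "".join([c for c in t if c.isalpha()]).lower()
--         if len(clean) >= 3 and clean not in stopwords:
--             return clean
--     # Fallback: use the longest alphabetic token
--     longest = ""
--     for t in tokens:
--         clean = "".join([c for c in t if c.isalpha()]).lower()
--         if len(clean) > len(longest):
--             longest = clean
--     return longest
-- ===== SOURCE B (Python) =====
-- def _pick_focus_word(tokens: list[str]) -> str:
--     # Single pass: track the first acceptable token and the longest cleaned token at once.
--     stopwords = {
--         "a", "an", "the", "to", "of", "and", "or", "but", "for", "with",
--         "at", "in", "on", "from", "by", "is", "are", "was", "were", "be",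
--         "been", "being", "do", "does", "did", "have", "has", "had", "i",
--         "you", "he", "she", "it", "we", "they", "me", "him", "her", "them",
--         "my", "your", "his", "her", "its", "our", "their", "this", "that",
--         "these", "those", "there", "here", "as", "so", "if", "then", "when",
--     }
--     first_valid = None
--     longest = ""
--     for t in tokens:
--         clean = "".join(c for c in t if c.isalpha()).lower()
--         if first_valid is None and len(clean) >= 3 and clean not in stopwords:
--             first_valid = clean
--         if len(clean) > len(longest):
--             longest = clean
--     return first_valid if first_valid is not None else longest
-- ===== Notes on version B (the rewrite author's own statement) =====
-- stated objective: alternative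
-- what changed: A's early-returning first pass plus a separate fallback scan for the longest token are collapsed into one traversal that maintains both the first valid token and the longest cleaned token.
import Mathlib
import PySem

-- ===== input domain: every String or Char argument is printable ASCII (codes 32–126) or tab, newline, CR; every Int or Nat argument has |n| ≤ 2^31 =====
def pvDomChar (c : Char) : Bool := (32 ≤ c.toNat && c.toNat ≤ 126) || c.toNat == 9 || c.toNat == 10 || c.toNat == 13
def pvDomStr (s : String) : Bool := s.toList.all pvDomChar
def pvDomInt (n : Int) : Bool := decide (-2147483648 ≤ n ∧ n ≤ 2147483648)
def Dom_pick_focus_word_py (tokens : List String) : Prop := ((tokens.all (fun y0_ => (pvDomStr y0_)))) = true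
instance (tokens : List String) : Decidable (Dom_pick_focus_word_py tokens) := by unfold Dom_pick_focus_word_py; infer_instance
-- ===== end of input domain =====

-- B is a single pass maintaining two accumulators instead of A's early-returning first loop plus a separate fallback scan (objective: simpler/alternative, same cost).

-- shared stopword set and token cleaning (identical literal code in both Pythons)
def pfwStopwords : PySem.Set String := PySem.Set.ofList
  [ "a", "an", "the", "to", "of", "and", "or", "but", "for", "with",
    "at", "in", "on", "from", "by", "is", "are", "was", "were", "be",
    "been", "being", "do", "does", "did", "have", "has", "had", "i",
    "you", "he", "she", "it", "we", "they", "me", "him", "her", "them",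
    "my", "your", "his", "her", "its", "our", "their", "this", "that",
    "these", "those", "there", "here", "as", "so", "if", "then", "when" ]

-- clean = "".join([c for c in t if c.isalpha()]).lower(), kept as List Char
def pfwClean (t : String) : List Char :=
  PySem.Chars.lower (t.toList.filter (fun c => PySem.Chars.isalpha c))

def pfwValid (clean : List Char) : Bool :=
  decide (3 ≤ clean.length) && !(PySem.Set.contains pfwStopwords (String.mk clean))

-- ===== PORT A =====
-- first loop of A: early return of the first valid cleaned token
def pfwFirstLoop : List String → Option (List Char)
  | [] => none
  | t :: rest =>
    let clean := pfwClean t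
    if pfwValid clean then some clean else pfwFirstLoop rest

-- second loop of A: longest cleaned token (strict >, first maximum kept)
def pfwLongest (tokens : List String) : List Char :=
  tokens.foldl (fun longest t =>
    let clean := pfwClean t
    if longest.length < clean.length then clean else longest) []

def pick_focus_word_py (tokens : List String) : String :=
  match pfwFirstLoop tokens with
  | some clean => String.mk clean
  | none => String.mk (pfwLongest tokens)

-- ===== PORT B =====
-- one loop, two accumulators: (first_valid, longest)
def pfwStep (st : Option (List Char) × List Char) (t : String) :
    Option (List Char) × List Char :=
  let clean := pfwClean t
  let fv := match st.1 with
    | some w => some w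
    | none => if pfwValid clean then some clean else none
  let lg := if st.2.length < clean.length then clean else st.2
  (fv, lg)

def pick_focus_word_py_alt (tokens : List String) : String :=
  let st := tokens.foldl pfwStep (none, [])
  match st.1 with
  | some w => String.mk w
  | none => String.mk st.2

-- ===== PRECONDITION & SPEC =====
def Spec_pick_focus_word_py (tokens : List String) (out : String) : Prop := out = pick_focus_word_py_alt tokens
instance (tokens : List String) (out : String) : Decidable (Spec_pick_focus_word_py tokens out) := by unfold Spec_pick_focus_word_py; infer_instance

-- ===== CLAIM (what is proved, stated in full; the proofs are below) =====
def Claim_equal_pick_focus_word_py : Prop := ∀ (tokens : List String), Dom_pick_focus_word_py tokens → Spec_pick_focus_word_py tokens (pick_focus_word_py tokens)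

-- ===== LEMMAS AND PROOFS =====

-- once first_valid is set, the fold only updates the longest component
theorem pfw_fold_some (tokens : List String) (w : List Char) (lg : List Char) :
    tokens.foldl pfwStep (some w, lg) =
      (some w, tokens.foldl (fun longest t =>
        let clean := pfwClean t
        if longest.length < clean.length then clean else longest) lg) := by
  induction tokens generalizing lg with
  | nil => rfl
  | cons t rest ih =>
    simp only [List.foldl_cons, pfwStep]
    exact ih _

-- the fold from (none, lg) computes A's two loops (the longest loop started at lg)
theorem pfw_fold_none (tokens : List String) (lg : List Char) :
    tokens.foldl pfwStep (none, lg) =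
      (pfwFirstLoop tokens, tokens.foldl (fun longest t =>
        let clean := pfwClean t
        if longest.length < clean.length then clean else longest) lg) := by
  induction tokens generalizing lg with
  | nil => rfl
  | cons t rest ih =>
    simp only [List.foldl_cons, pfwStep, pfwFirstLoop]
    by_cases h : pfwValid (pfwClean t) = true
    · simp only [h, if_pos] at *
      exact pfw_fold_some rest _ _
    · simp only [eq_false_of_ne_true h, Bool.false_eq_true, if_false]
      exact ih _

-- ===== VERDICT (by name: the statement is the Claim_ definition above) =====
theorem pick_focus_word_py_spec : Claim_equal_pick_focus_word_py := by
  intro tokens _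
  unfold Spec_pick_focus_word_py pick_focus_word_py pick_focus_word_py_alt
  rw [pfw_fold_none]
  cases h : pfwFirstLoop tokens with
  | none => simp [pfwLongest]
  | some w => simp
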